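-- pv_equiv track=rewrite | github.com/Skywalker2012/qiskit-terra | qiskit/transpiler/paulihedral.py | str_lex_key
-- ===== SOURCE A (Python) =====
-- def str_lex_key(weighted_pauli_str):
--     value = 0
--     '''q0 corresponds to the right-most pauli op'''
--     for op in weighted_pauli_str[0]:
--         value *= 4
--         if op == 'I':
--             value += 0
--         elif op == 'X':
--             value += 1
--         elif op == 'Y':
--             value += 2
--         elif op == 'Z':
--             value += 3
--     return value
-- ===== SOURCE B (Python) =====
-- def str_lex_key(weighted_pauli_str):
--     mapping = {'I': 0, 'X': 1, 'Y': 2, 'Z': 3}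
--     total = 0
--     weight = 1
--     for op in reversed(weighted_pauli_str[0]):
--         total += mapping.get(op, 0) * weight
--         weight *= 4
--     return total
-- ===== Notes on version B (the rewrite author's own statement) =====
-- stated objective: alternative
-- what changed: Replaces A's left-to-right Horner loop (multiply accumulator by 4, add via an if/elif chain) with a right-to-left positional-weight sum: traverse the string reversed, adding the character's value from a {'I','X','Y','Z'} mapping times an incrementally maintained power-of-4 weight.
import Mathlib
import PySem

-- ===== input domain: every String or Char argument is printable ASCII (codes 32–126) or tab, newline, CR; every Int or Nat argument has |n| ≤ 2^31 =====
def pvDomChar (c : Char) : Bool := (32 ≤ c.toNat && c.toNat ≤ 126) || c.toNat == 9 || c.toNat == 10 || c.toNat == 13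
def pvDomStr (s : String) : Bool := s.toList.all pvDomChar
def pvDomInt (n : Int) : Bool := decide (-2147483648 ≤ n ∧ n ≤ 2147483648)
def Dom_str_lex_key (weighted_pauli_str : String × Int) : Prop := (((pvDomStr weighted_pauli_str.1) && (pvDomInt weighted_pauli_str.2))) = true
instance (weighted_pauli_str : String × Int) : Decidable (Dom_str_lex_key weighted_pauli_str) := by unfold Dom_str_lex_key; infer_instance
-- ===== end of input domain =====

-- B replaces A's left-to-right Horner loop with a right-to-left positional-weight sum (mapping value × maintained power-of-4 weight); alternative decomposition, same cost.


-- ===== PORT A =====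
def str_lex_key (weighted_pauli_str : String × Int) : Int :=
  weighted_pauli_str.1.toList.foldl
    (fun value op =>
      let value := value * 4
      if op = 'I' then value + 0
      else if op = 'X' then value + 1
      else if op = 'Y' then value + 2
      else if op = 'Z' then value + 3
      else value)
    0

-- ===== PORT B =====
def pvMapping : PySem.Dict Char Int :=
  PySem.Dict.ofList [('I', 0), ('X', 1), ('Y', 2), ('Z', 3)]

def str_lex_key_alt (weighted_pauli_str : String × Int) : Int :=
  (weighted_pauli_str.1.toList.reverse.foldl
    (fun (st : Int × Int) op => (st.1 + pvMapping.getD op 0 * st.2, st.2 * 4))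
    (0, 1)).1

-- ===== PRECONDITION & SPEC =====
def Spec_str_lex_key (weighted_pauli_str : String × Int) (out : Int) : Prop := out = str_lex_key_alt weighted_pauli_str
instance (weighted_pauli_str : String × Int) (out : Int) : Decidable (Spec_str_lex_key weighted_pauli_str out) := by unfold Spec_str_lex_key; infer_instance

-- ===== CLAIM (what is proved, stated in full; the proofs are below) =====
def Claim_equal_str_lex_key : Prop := ∀ (weighted_pauli_str : String × Int), Dom_str_lex_key weighted_pauli_str → Spec_str_lex_key weighted_pauli_str (str_lex_key weighted_pauli_str)

-- ===== LEMMAS AND PROOFS =====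

-- A's loop step, named for the proofs
def pvStepA (value : Int) (op : Char) : Int :=
  let value := value * 4
  if op = 'I' then value + 0
  else if op = 'X' then value + 1
  else if op = 'Y' then value + 2
  else if op = 'Z' then value + 3
  else value

lemma stepA_eq (value : Int) (op : Char) :
    pvStepA value op = value * 4 + pvMapping.getD op 0 := by
  have hm : pvMapping = PySem.Dict.mk [('I', 0), ('X', 1), ('Y', 2), ('Z', 3)] := by decide
  unfold pvStepA
  split_ifs with h1 h2 h3 h4
  · subst h1
    have : pvMapping.getD 'I' 0 = 0 := by decide
    rw [this]
  · subst h2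
    have : pvMapping.getD 'X' 0 = 1 := by decide
    rw [this]
  · subst h3
    have : pvMapping.getD 'Y' 0 = 2 := by decide
    rw [this]
  · subst h4
    have : pvMapping.getD 'Z' 0 = 3 := by decide
    rw [this]
  · rw [hm]
    simp [PySem.Dict.getD, PySem.Dict.get?, Ne.symm h1, Ne.symm h2, Ne.symm h3, Ne.symm h4]

lemma revSum (m : List Char) (t w : Int) :
    (m.foldl (fun (st : Int × Int) op => (st.1 + pvMapping.getD op 0 * st.2, st.2 * 4)) (t, w)).1
      = t + w * m.reverse.foldl pvStepA 0 := by
  induction m generalizing t w with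
  | nil => simp
  | cons c m ih =>
    simp only [List.foldl_cons, List.reverse_cons]
    rw [ih, List.foldl_append]
    simp only [List.foldl_cons, List.foldl_nil]
    rw [stepA_eq]
    ring

-- ===== VERDICT (by name: the statement is the Claim_ definition above) =====
theorem str_lex_key_spec : Claim_equal_str_lex_key := by
  intro w _
  show str_lex_key w = str_lex_key_alt w
  unfold str_lex_key str_lex_key_alt
  rw [revSum, List.reverse_reverse]
  simp only [zero_add, one_mul]
  rfl
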